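-- pv_equiv track=rewrite | github.com/Vishwas-Chaudhary/COMPILER-PBL | pbl evaluation final/validator.py | semantic_analysis
-- ===== SOURCE A (Python) =====
-- def semantic_analysis(grammar):
--     """Find problems: undefined symbols, unreachable rules, left recursion."""
--     warnings = []
--     defined = set(grammar.keys())
--
--     # 1. Find undefined non-terminals (used on RHS but never defined on LHS)
--     referenced = set()
--     for productions in grammar.values():
--         for prod in productions:
--             for ch in prod:
--                 if ch.isupper():
--                     referenced.add(ch)
--
--     for nt in sorted(referenced - defined):
--         warnings.append(f"Undefined non-terminal '{nt}' used in production but never defined.")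
--
--     # 2. Find unreachable non-terminals (defined but can't be reached from start)
--     if defined:
--         start = list(grammar.keys())[0]
--         reachable = set()
--         stack = [start]
--
--         while stack:
--             current = stack.pop()
--             if current in reachable:
--                 continue
--             reachable.add(current)
--             for prod in grammar.get(current, []):
--                 for ch in prod:
--                     if ch.isupper() and ch not in reachable:
--                         stack.append(ch)
--
--         for nt in sorted(defined - reachable):
--             warnings.append(f"Non-terminal '{nt}' is defined but unreachable from start symbol '{start}'.")
--
--     # 3. Check for left recursion (direct and indirect)
--     #    For each non-terminal, follow the leftmost symbols to see if it leads back to itself.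
--     for lhs in grammar:
--         # Find all non-terminals reachable by following leftmost symbols
--         left_reachable = set()
--         to_visit = [lhs]
--
--         while to_visit:
--             current = to_visit.pop()
--             for prod in grammar.get(current, []):
--                 if prod and prod[0].isupper() and prod[0] not in left_reachable:
--                     left_reachable.add(prod[0])
--                     if prod[0] != lhs:
--                         to_visit.append(prod[0])
--
--         if lhs in left_reachable:
--             # Check if direct or indirect
--             is_direct = any(prod and prod[0] == lhs for prod in grammar.get(lhs, []))
--             if is_direct:
--                 for prod in grammar.get(lhs, []):
--                     if prod and prod[0] == lhs:
--                         warnings.append(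
--                             f"Direct left recursion detected: '{lhs} -> {prod}'."
--                         )
--             else:
--                 warnings.append(
--                     f"Indirect left recursion detected involving '{lhs}'."
--                 )
--
--     return warnings
-- ===== SOURCE B (Python) =====
-- def _closure(starts, succ):
--     """All symbols reachable from `starts` by following `succ` edges (BFS by levels)."""
--     reach = set(starts)
--     frontier = list(starts)
--     while frontier:
--         new = []
--         for x in frontier:
--             for y in succ.get(x, []):
--                 if y not in reach:
--                     reach.add(y)
--                     new.append(y)
--         frontier = new
--     return reach
--
--
-- def semantic_analysis(grammar):
--     """Find problems: undefined symbols, unreachable rules, left recursion."""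
--     warnings = []
--     defined = set(grammar)
--
--     # 1. Undefined non-terminals: referenced on some RHS but never defined.
--     referenced = {ch for prods in grammar.values() for prod in prods for ch in prod
--                   if ch.isupper()}
--     warnings += [f"Undefined non-terminal '{nt}' used in production but never defined."
--                  for nt in sorted(referenced - defined)]
--
--     # Build both symbol graphs once, as adjacency lists.
--     full_succ = {lhs: [ch for prod in prods for ch in prod if ch.isupper()]
--                  for lhs, prods in grammar.items()}
--     left_succ = {lhs: [prod[0] for prod in prods if prod and prod[0].isupper()]
--                  for lhs, prods in grammar.items()}
--
--     # 2. Unreachable non-terminals: one traversal from the start symbol.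
--     if grammar:
--         start = next(iter(grammar))
--         reachable = _closure([start], full_succ)
--         warnings += [f"Non-terminal '{nt}' is defined but unreachable from start symbol '{start}'."
--                      for nt in sorted(defined - reachable)]
--
--     # 3. Left recursion: lhs is left-recursive iff lhs is reachable from its own
--     #    leftmost successors in the leftmost-symbol graph.
--     for lhs, prods in grammar.items():
--         if lhs in _closure(left_succ[lhs], left_succ):
--             direct = [prod for prod in prods if prod and prod[0] == lhs]
--             if direct:
--                 for prod in direct:
--                     warnings.append(f"Direct left recursion detected: '{lhs} -> {prod}'.")
--             else:
--                 warnings.append(f"Indirect left recursion detected involving '{lhs}'.")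
--
--     return warnings
-- ===== Notes on version B (the rewrite author's own statement) =====
-- stated objective: alternative
-- what changed: B builds the referenced-symbol and leftmost-symbol graphs once as adjacency lists and answers both the reachability question and every left-recursion question with one shared breadth-first level-by-level closure helper, instead of A's re-scanning of the production strings character by character inside a stack-DFS and a fresh per-nonterminal worklist loop.
import Mathlib
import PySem

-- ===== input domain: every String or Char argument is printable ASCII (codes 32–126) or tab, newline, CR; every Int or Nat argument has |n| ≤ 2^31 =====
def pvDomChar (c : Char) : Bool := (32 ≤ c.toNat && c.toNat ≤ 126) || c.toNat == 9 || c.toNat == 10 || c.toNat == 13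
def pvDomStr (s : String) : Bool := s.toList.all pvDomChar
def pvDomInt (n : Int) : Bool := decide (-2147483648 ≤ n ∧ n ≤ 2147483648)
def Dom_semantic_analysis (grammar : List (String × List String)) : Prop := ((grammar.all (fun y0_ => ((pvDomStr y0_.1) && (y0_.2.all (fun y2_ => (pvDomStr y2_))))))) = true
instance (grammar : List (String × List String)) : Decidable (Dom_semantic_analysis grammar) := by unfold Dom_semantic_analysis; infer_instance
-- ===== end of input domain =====

-- B replaces A's per-symbol character-rescanning worklists by two adjacency lists built
-- once plus one shared level-by-level closure helper (objective: alternative traversal).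

-- ===== shared small helpers (used verbatim by both Pythons: message texts, 1-char strings) =====

/-- Python's 1-character string for a character (iterating a `str` yields these). -/
def pvCh (c : Char) : String := String.ofList [c]

def pvMsgUndef (nt : String) : String :=
  "Undefined non-terminal '" ++ nt ++ "' used in production but never defined."
def pvMsgUnreach (start nt : String) : String :=
  "Non-terminal '" ++ nt ++ "' is defined but unreachable from start symbol '" ++ start ++ "'."
def pvMsgDirect (lhs prod : String) : String :=
  "Direct left recursion detected: '" ++ lhs ++ " -> " ++ prod ++ "'."
def pvMsgIndirect (lhs : String) : String :=
  "Indirect left recursion detected involving '" ++ lhs ++ "'."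

/-- Python's `prod and prod[0] == lhs` (both programs test direct left recursion this way). -/
def pvIsDirect (lhs prod : String) : Bool :=
  match prod.toList with
  | [] => false
  | c :: _ => pvCh c == lhs

-- ===== PORT A =====

/-- A fold whose every step either strictly grows a measure or leaves the state unchanged
either grows the measure or leaves the state unchanged. -/
lemma pvFoldGrow {σ α : Type} (m : σ → Nat) (f : σ → α → σ)
    (hstep : ∀ st a, m st ≤ m (f st a) ∧ (m (f st a) = m st → f st a = st)) :
    ∀ (l : List α) (st : σ), m st ≤ m (l.foldl f st) ∧
      (m (l.foldl f st) = m st → l.foldl f st = st) := by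
  intro l
  induction l with
  | nil => intro st; exact ⟨Nat.le_refl _, fun _ => rfl⟩
  | cons a t ih =>
    intro st
    rcases hstep st a with ⟨h1, h2⟩
    rcases ih (f st a) with ⟨h3, h4⟩
    refine ⟨Nat.le_trans h1 h3, fun he => ?_⟩
    simp only [List.foldl_cons] at he ⊢
    have hma : m (f st a) = m st := Nat.le_antisymm (by omega) h1
    have hfa : f st a = st := h2 hma
    exact (h4 (by omega)).trans hfa

/-- Invariant preservation along a fold. -/
lemma pvFoldPres {σ α : Type} (P : σ → Prop) (f : σ → α → σ)
    (hstep : ∀ st a, P st → P (f st a)) :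
    ∀ (l : List α) (st : σ), P st → P (l.foldl f st) := by
  intro l
  induction l with
  | nil => exact fun st h => h
  | cons a t ih => exact fun st h => ih (f st a) (hstep st a h)

/-- Finite universe every visited symbol lives in: the keys plus every production
character as a 1-char string (used only for the termination measure). -/
def pvDfsUniv (g : PySem.Dict String (List String)) : List String :=
  g.keys ++ g.values.flatMap (fun prods => prods.flatMap (fun p => p.toList.map pvCh))

lemma pvDict_getD_mem_values (g : PySem.Dict String (List String)) (x : String) :
    ∀ p ∈ g.getD x [], ∃ v ∈ g.values, p ∈ v := by
  intro p hp
  unfold PySem.Dict.getD at hp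
  cases hfind : g.get? x with
  | none => rw [hfind] at hp; simp at hp
  | some v =>
    rw [hfind] at hp
    simp only [Option.getD_some] at hp
    unfold PySem.Dict.get? at hfind
    cases hf : g.items.find? (fun q => q.1 == x) with
    | none => rw [hf] at hfind; simp at hfind
    | some q =>
      rw [hf] at hfind
      simp only [Option.map_some] at hfind
      have hq := List.mem_of_find?_eq_some hf
      cases hfind
      unfold PySem.Dict.values
      exact ⟨q.2, List.mem_map.2 ⟨q, hq, rfl⟩, hp⟩

lemma pvDfsUniv_of_prod (g : PySem.Dict String (List String)) (x : String) (p : String)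
    (c : Char) (hp : p ∈ g.getD x []) (hc : c ∈ p.toList) : pvCh c ∈ pvDfsUniv g := by
  unfold pvDfsUniv
  obtain ⟨v, hv, hpv⟩ := pvDict_getD_mem_values g x p hp
  refine List.mem_append_right _ ?_
  exact List.mem_flatMap.2 ⟨v, hv, List.mem_flatMap.2 ⟨p, hpv, List.mem_map.2 ⟨c, hc, rfl⟩⟩⟩

lemma pvFlatUniv_of_prod (g : PySem.Dict String (List String)) (x : String) (p : String)
    (c : Char) (hp : p ∈ g.getD x []) (hc : c ∈ p.toList) :
    pvCh c ∈ g.values.flatMap (fun prods => prods.flatMap (fun p => p.toList.map pvCh)) := by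
  obtain ⟨v, hv, hpv⟩ := pvDict_getD_mem_values g x p hp
  exact List.mem_flatMap.2 ⟨v, hv, List.mem_flatMap.2 ⟨p, hpv, List.mem_map.2 ⟨c, hc, rfl⟩⟩⟩

lemma pvNodupLen {α : Type} [DecidableEq α] {l u : List α} (hnd : l.Nodup)
    (hs : ∀ x ∈ l, x ∈ u) : l.length ≤ u.length := by
  calc l.length = l.toFinset.card := (List.toFinset_card_of_nodup hnd).symm
    _ ≤ u.toFinset.card := Finset.card_le_card (fun x hx => by
        simp only [List.mem_toFinset] at *; exact hs x hx)
    _ ≤ u.length := u.toFinset_card_le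

/-- Inner loop `for ch in prod: if ch.isupper() and ch not in reachable: stack.append(ch)`
(stack top is the list head here, matching Python's append/pop at the list end). -/
def pvCharPushA (r : PySem.Set String) (cs : List Char) (st : List String) : List String :=
  cs.foldl (fun st ch =>
    if PySem.Chars.isupper ch && !(PySem.Set.contains r (pvCh ch)) then pvCh ch :: st else st) st

/-- `for prod in grammar.get(current, []): for ch in prod: …` -/
def pvPushA (r : PySem.Set String) (prods : List String) (st : List String) : List String :=
  prods.foldl (fun st prod => pvCharPushA r prod.toList st) st

lemma pvCharPushA_sound (r : PySem.Set String) (cs : List Char) (st : List String) :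
    ∀ x ∈ pvCharPushA r cs st,
      x ∈ st ∨ ∃ c ∈ cs, PySem.Chars.isupper c ∧ x = pvCh c := by
  induction cs generalizing st with
  | nil => intro x hx; exact Or.inl hx
  | cons c t ih =>
    intro x hx
    unfold pvCharPushA at hx
    simp only [List.foldl_cons] at hx
    rcases ih _ x hx with h | ⟨c', hc', hu, rfl⟩
    · split at h
      · next hcond =>
        rcases List.mem_cons.1 h with rfl | h
        · refine Or.inr ⟨c, List.mem_cons_self, ?_, rfl⟩
          have := hcond
          simp only [Bool.and_eq_true] at this
          exact this.1
        · exact Or.inl h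
      · exact Or.inl h
    · exact Or.inr ⟨c', List.mem_cons_of_mem _ hc', hu, rfl⟩

lemma pvPushA_sound (r : PySem.Set String) (prods : List String) (st : List String) :
    ∀ x ∈ pvPushA r prods st,
      x ∈ st ∨ ∃ p ∈ prods, ∃ c ∈ p.toList, PySem.Chars.isupper c ∧ x = pvCh c := by
  induction prods generalizing st with
  | nil => intro x hx; exact Or.inl hx
  | cons p t ih =>
    intro x hx
    unfold pvPushA at hx
    simp only [List.foldl_cons] at hx
    rcases ih _ x hx with h | ⟨p', hp', c, hc, hu, rfl⟩
    · rcases pvCharPushA_sound r p.toList st x h with h | ⟨c, hc, hu, rfl⟩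
      · exact Or.inl h
      · exact Or.inr ⟨p, List.mem_cons_self, c, hc, hu, rfl⟩
    · exact Or.inr ⟨p', List.mem_cons_of_mem _ hp', c, hc, hu, rfl⟩

/-- A's stack DFS of part 2 (`while stack: current = stack.pop() …`); `univ` and the proof
arguments only justify termination (visited set within a finite universe). -/
def pvDfsA (g : PySem.Dict String (List String)) (univ : List String) (reach stack : List String)
    (hnd : reach.Nodup) (hr : ∀ x ∈ reach, x ∈ univ)
    (hs : ∀ x ∈ stack, x ∈ univ)
    (hpush : ∀ x p c, p ∈ g.getD x [] → c ∈ p.toList → pvCh c ∈ univ) : List String :=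
  match stack with
  | [] => reach
  | current :: rest =>
    if hc : PySem.Set.contains reach current then
      pvDfsA g univ reach rest hnd hr (fun x hx => hs x (List.mem_cons_of_mem _ hx)) hpush
    else
      pvDfsA g univ (PySem.Set.add reach current)
        (pvPushA (PySem.Set.add reach current) (g.getD current []) rest)
        (PySem.Set.nodup_add reach current hnd)
        (fun x hx => by
          rcases (PySem.Set.mem_add reach current x).1 hx with h | h
          · exact hr x h
          · exact h ▸ hs current (List.mem_cons_self))
        (fun x hx => by
          rcases pvPushA_sound _ _ _ x hx with h | ⟨p, hp, c, hcp, _, rfl⟩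
          · exact hs x (List.mem_cons_of_mem _ h)
          · exact hpush current p c hp hcp)
        hpush
  termination_by (univ.length + 1 - reach.length, stack.length)
  decreasing_by
  · exact Prod.Lex.right _ (Nat.lt_succ_self _)
  · apply Prod.Lex.left
    have hlen : (PySem.Set.add reach current).length = reach.length + 1 := by
      rw [PySem.Set.add_of_not_mem (fun hmem => hc ((PySem.Set.contains_iff reach current).2 hmem))]
      simp
    have hle : reach.length ≤ univ.length := pvNodupLen hnd hr
    omega

/-- One step of A's part-3 inner loop body (`if prod and prod[0].isupper() and
prod[0] not in left_reachable: add it; push it unless it is lhs`). -/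
def pvLeftStepA (lhs : String) (st : PySem.Set String × List String) (prod : String) :
    PySem.Set String × List String :=
  match prod.toList with
  | [] => st
  | c :: _ =>
    if PySem.Chars.isupper c && !(PySem.Set.contains st.1 (pvCh c)) then
      (PySem.Set.add st.1 (pvCh c), if pvCh c == lhs then st.2 else pvCh c :: st.2)
    else st

def pvLeftPushA (lhs : String) (prods : List String) (st : PySem.Set String × List String) :
    PySem.Set String × List String :=
  prods.foldl (pvLeftStepA lhs) st

lemma pvLeftStepA_grow (lhs : String) (st : PySem.Set String × List String) (prod : String) :
    st.1.length ≤ (pvLeftStepA lhs st prod).1.length ∧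
    ((pvLeftStepA lhs st prod).1.length = st.1.length → pvLeftStepA lhs st prod = st) := by
  unfold pvLeftStepA
  cases prod.toList with
  | nil => exact ⟨Nat.le_refl _, fun _ => rfl⟩
  | cons c t =>
    dsimp only
    split
    · next hcond =>
      have hnm : pvCh c ∉ st.1 := fun hmem => by
        rw [(PySem.Set.contains_iff st.1 (pvCh c)).2 hmem] at hcond
        simp at hcond
      rw [PySem.Set.add_of_not_mem hnm]
      simp only [List.length_append, List.length_cons, List.length_nil]
      exact ⟨by omega, fun he => by omega⟩
    · exact ⟨Nat.le_refl _, fun _ => rfl⟩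

lemma pvLeftStepA_fst_sound (lhs : String) (st : PySem.Set String × List String) (prod : String) :
    ∀ x ∈ (pvLeftStepA lhs st prod).1,
      x ∈ st.1 ∨ ∃ c, prod.toList.head? = some c ∧ PySem.Chars.isupper c ∧ x = pvCh c := by
  intro x hx
  unfold pvLeftStepA at hx
  cases hp : prod.toList with
  | nil => rw [hp] at hx; exact Or.inl hx
  | cons c t =>
    rw [hp] at hx
    dsimp only at hx
    split at hx
    · next hcond =>
      dsimp only at hx
      rcases (PySem.Set.mem_add _ _ _).1 hx with h | rfl
      · exact Or.inl h
      · simp only [Bool.and_eq_true] at hcond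
        exact Or.inr ⟨c, rfl, hcond.1, rfl⟩
    · exact Or.inl hx

lemma pvLeftPushA_grow (lhs : String) (prods : List String) (st : PySem.Set String × List String) :
    st.1.length ≤ (pvLeftPushA lhs prods st).1.length ∧
    ((pvLeftPushA lhs prods st).1.length = st.1.length → pvLeftPushA lhs prods st = st) := by
  exact pvFoldGrow (fun st => st.1.length) (pvLeftStepA lhs) (pvLeftStepA_grow lhs) prods st

lemma pvLeftPushA_nodup (lhs : String) (prods : List String) (st : PySem.Set String × List String)
    (h : st.1.Nodup) : (pvLeftPushA lhs prods st).1.Nodup := by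
  refine pvFoldPres (fun st => st.1.Nodup) (pvLeftStepA lhs) ?_ prods st h
  intro st a hnd
  unfold pvLeftStepA
  cases a.toList with
  | nil => exact hnd
  | cons c t =>
    dsimp only
    split
    · exact PySem.Set.nodup_add _ _ hnd
    · exact hnd

lemma pvLeftPushA_fst_sound (lhs : String) (prods : List String)
    (st : PySem.Set String × List String) :
    ∀ x ∈ (pvLeftPushA lhs prods st).1,
      x ∈ st.1 ∨ ∃ p ∈ prods, ∃ c, p.toList.head? = some c ∧ PySem.Chars.isupper c ∧ x = pvCh c := by
  induction prods generalizing st with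
  | nil => intro x hx; exact Or.inl hx
  | cons p t ih =>
    intro x hx
    unfold pvLeftPushA at hx
    simp only [List.foldl_cons] at hx
    rcases ih _ x hx with h | ⟨p', hp', c, hc, hu, rfl⟩
    · rcases pvLeftStepA_fst_sound lhs st p x h with h | ⟨c, hc, hu, rfl⟩
      · exact Or.inl h
      · exact Or.inr ⟨p, List.mem_cons_self, c, hc, hu, rfl⟩
    · exact Or.inr ⟨p', List.mem_cons_of_mem _ hp', c, hc, hu, rfl⟩

/-- A's part-3 worklist (`to_visit`) loop for one `lhs`. -/
def pvLeftDfsA (g : PySem.Dict String (List String)) (lhs : String) (lr tv : List String)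
    (hnd : lr.Nodup) (hlr : ∀ x ∈ lr, x ∈ pvDfsUniv g) : List String :=
  match tv with
  | [] => lr
  | current :: rest =>
    pvLeftDfsA g lhs (pvLeftPushA lhs (g.getD current []) (lr, rest)).1
      (pvLeftPushA lhs (g.getD current []) (lr, rest)).2
      (pvLeftPushA_nodup lhs _ _ hnd)
      (fun x hx => by
        rcases pvLeftPushA_fst_sound lhs _ _ x hx with h | ⟨p, hp, c, hcp, _, rfl⟩
        · exact hlr x h
        · exact pvDfsUniv_of_prod g current p c hp (by
            cases hl : p.toList with
            | nil => rw [hl] at hcp; simp at hcp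
            | cons a t => rw [hl] at hcp; simp at hcp; rw [hcp] at hl ⊢; exact List.mem_cons_self))
  termination_by ((pvDfsUniv g).length + 1 - lr.length, tv.length)
  decreasing_by
  · rcases pvLeftPushA_grow lhs (g.getD current []) (lr, rest) with ⟨hle, heq⟩
    have hle2 : lr.length ≤ (pvLeftPushA lhs (g.getD current []) (lr, rest)).1.length := hle
    by_cases h : (pvLeftPushA lhs (g.getD current []) (lr, rest)).1.length = lr.length
    · rw [heq h]
      exact Prod.Lex.right _ (Nat.lt_succ_self _)
    · apply Prod.Lex.left
      have hub : lr.length ≤ (pvDfsUniv g).length := pvNodupLen hnd hlr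
      omega

/-- Port of A. Mirrors `validator.semantic_analysis`: per-symbol character scans,
a stack DFS for reachability and a fresh worklist per `lhs` for left recursion. -/
def semantic_analysis (grammar : List (String × List String)) : List String :=
  let g : PySem.Dict String (List String) := PySem.Dict.ofList grammar
  let defined : PySem.Set String := PySem.Set.ofList g.keys
  let referenced : PySem.Set String :=
    g.values.foldl (fun acc prods =>
      prods.foldl (fun acc prod =>
        prod.toList.foldl (fun acc ch =>
          if PySem.Chars.isupper ch then PySem.Set.add acc (pvCh ch) else acc) acc) acc)
      PySem.Set.empty
  let warnings : List String :=
    (PySem.List.sorted (PySem.Set.diff referenced defined) (fun x => x) false).foldl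
      (fun ws nt => ws ++ [pvMsgUndef nt]) []
  let warnings : List String :=
    match g.keys with   -- `if defined:` — defined = set(grammar.keys()) is empty iff the key list is
    | [] => warnings
    | start :: _ =>
      let reachable := pvDfsA g
        (start :: g.values.flatMap (fun prods => prods.flatMap (fun p => p.toList.map pvCh)))
        [] [start] List.nodup_nil (by simp)
        (fun x hx => by
          rw [List.mem_singleton] at hx
          subst hx
          exact List.mem_cons_self)
        (fun x p c hp hc => List.mem_cons_of_mem _ (pvFlatUniv_of_prod g x p c hp hc))
      (PySem.List.sorted (PySem.Set.diff defined reachable) (fun x => x) false).foldl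
        (fun ws nt => ws ++ [pvMsgUnreach start nt]) warnings
  g.keys.foldl (fun ws lhs =>
    let lr := pvLeftDfsA g lhs [] [lhs] List.nodup_nil (by simp)
    if PySem.Set.contains lr lhs then
      if (g.getD lhs []).any (pvIsDirect lhs) then
        (g.getD lhs []).foldl (fun ws prod =>
          if pvIsDirect lhs prod then ws ++ [pvMsgDirect lhs prod] else ws) ws
      else ws ++ [pvMsgIndirect lhs]
    else ws) warnings

-- ===== PORT B =====

/-- `[ch for prod in prods for ch in prod if ch.isupper()]` -/
def pvFullSyms (prods : List String) : List String :=
  prods.flatMap (fun p => (p.toList.filter PySem.Chars.isupper).map pvCh)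

/-- `[prod[0] for prod in prods if prod and prod[0].isupper()]` -/
def pvLeftSyms (prods : List String) : List String :=
  prods.filterMap (fun p =>
    match p.toList with
    | [] => none
    | c :: _ => if PySem.Chars.isupper c then some (pvCh c) else none)

/-- The elementary update of `_closure`'s inner loop body. -/
def pvStepB (st : PySem.Set String × List String) (y : String) : PySem.Set String × List String :=
  if PySem.Set.contains st.1 y then st else (PySem.Set.add st.1 y, st.2 ++ [y])

lemma pvStepB_grow (st : PySem.Set String × List String) (y : String) :
    st.1.length ≤ (pvStepB st y).1.length ∧
    ((pvStepB st y).1.length = st.1.length → pvStepB st y = st) := by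
  unfold pvStepB
  split
  · exact ⟨Nat.le_refl _, fun _ => rfl⟩
  · next hcond =>
    have hnm : y ∉ st.1 := fun hmem => hcond ((PySem.Set.contains_iff st.1 y).2 hmem)
    rw [PySem.Set.add_of_not_mem hnm]
    simp only [List.length_append, List.length_cons, List.length_nil]
    exact ⟨by omega, fun he => by omega⟩

/-- One round of `_closure`'s while loop: expand every frontier symbol, recording
newly reached symbols in the accumulator (Python's `new`). -/
def pvRoundB (succ : PySem.Dict String (List String)) (frontier : List String)
    (st : PySem.Set String × List String) : PySem.Set String × List String :=
  frontier.foldl (fun st x => (succ.getD x []).foldl pvStepB st) st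

lemma pvRoundB_grow (succ : PySem.Dict String (List String)) (frontier : List String)
    (st : PySem.Set String × List String) :
    st.1.length ≤ (pvRoundB succ frontier st).1.length ∧
    ((pvRoundB succ frontier st).1.length = st.1.length → pvRoundB succ frontier st = st) := by
  refine pvFoldGrow (fun st => st.1.length) _ ?_ frontier st
  intro st a
  exact pvFoldGrow (fun st => st.1.length) pvStepB pvStepB_grow (succ.getD a []) st

lemma pvRoundB_nodup (succ : PySem.Dict String (List String)) (frontier : List String)
    (st : PySem.Set String × List String) (h : st.1.Nodup) : (pvRoundB succ frontier st).1.Nodup := by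
  refine pvFoldPres (fun st => st.1.Nodup) _ ?_ frontier st h
  intro st a hnd
  refine pvFoldPres (fun st => st.1.Nodup) pvStepB ?_ (succ.getD a []) st hnd
  intro st y hnd
  unfold pvStepB
  split
  · exact hnd
  · exact PySem.Set.nodup_add _ _ hnd

lemma pvStepBFold_fst_sound (ys : List String) (st : PySem.Set String × List String) :
    ∀ x ∈ (ys.foldl pvStepB st).1, x ∈ st.1 ∨ x ∈ ys := by
  induction ys generalizing st with
  | nil => intro x hx; exact Or.inl hx
  | cons y t ih =>
    intro x hx
    simp only [List.foldl_cons] at hx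
    rcases ih _ x hx with h | h
    · unfold pvStepB at h
      split at h
      · exact Or.inl h
      · rcases (PySem.Set.mem_add _ _ _).1 h with h | rfl
        · exact Or.inl h
        · exact Or.inr List.mem_cons_self
    · exact Or.inr (List.mem_cons_of_mem _ h)

lemma pvRoundB_fst_sound (succ : PySem.Dict String (List String)) (frontier : List String)
    (st : PySem.Set String × List String) :
    ∀ x ∈ (pvRoundB succ frontier st).1, x ∈ st.1 ∨ ∃ s ∈ frontier, x ∈ succ.getD s [] := by
  induction frontier generalizing st with
  | nil => intro x hx; exact Or.inl hx
  | cons a t ih =>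
    intro x hx
    unfold pvRoundB at hx
    simp only [List.foldl_cons] at hx
    rcases ih _ x hx with h | ⟨s, hs, hy⟩
    · rcases pvStepBFold_fst_sound _ _ x h with h | h
      · exact Or.inl h
      · exact Or.inr ⟨a, List.mem_cons_self, h⟩
    · exact Or.inr ⟨s, List.mem_cons_of_mem _ hs, hy⟩

/-- Membership in `pre ++ flattened values` for anything a successor list can produce. -/
lemma pvSuccUniv (succ : PySem.Dict String (List String)) (pre : List String) :
    ∀ x y, y ∈ succ.getD x [] → y ∈ pre ++ succ.values.flatMap id := by
  intro x y hy
  obtain ⟨v, hv, hyv⟩ := pvDict_getD_mem_values succ x y hy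
  exact List.mem_append_right _ (List.mem_flatMap.2 ⟨v, hv, hyv⟩)

/-- Port of B's `_closure`: breadth-first saturation by levels. The `univ` list and the
proof arguments only justify termination. -/
def pvClosureB (succ : PySem.Dict String (List String)) (univ : List String)
    (reach frontier : List String) (hnd : reach.Nodup) (hr : ∀ x ∈ reach, x ∈ univ)
    (hsucc : ∀ x y, y ∈ succ.getD x [] → y ∈ univ) : List String :=
  match frontier with
  | [] => reach
  | current :: rest =>
    pvClosureB succ univ (pvRoundB succ (current :: rest) (reach, [])).1
      (pvRoundB succ (current :: rest) (reach, [])).2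
      (pvRoundB_nodup succ _ _ hnd)
      (fun x hx => by
        rcases pvRoundB_fst_sound succ _ _ x hx with h | ⟨s, _, hy⟩
        · exact hr x h
        · exact hsucc s x hy)
      hsucc
  termination_by (univ.length + 1 - reach.length, frontier.length)
  decreasing_by
  · rcases pvRoundB_grow succ (current :: rest) (reach, []) with ⟨hle, heq⟩
    have hle2 : reach.length ≤ (pvRoundB succ (current :: rest) (reach, [])).1.length := hle
    by_cases h : (pvRoundB succ (current :: rest) (reach, [])).1.length = reach.length
    · rw [heq h]
      exact Prod.Lex.right _ (Nat.succ_pos _)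
    · apply Prod.Lex.left
      have hub : reach.length ≤ univ.length := pvNodupLen hnd hr
      omega

/-- Port of B. Builds both symbol graphs once (`full_succ`, `left_succ`) and answers
every reachability question with the shared `_closure` helper. -/
def semantic_analysis_alt (grammar : List (String × List String)) : List String :=
  let g : PySem.Dict String (List String) := PySem.Dict.ofList grammar
  let defined : PySem.Set String := PySem.Set.ofList g.keys
  let referenced : PySem.Set String := PySem.Set.ofList (g.values.flatMap pvFullSyms)
  let warnings : List String :=
    (PySem.List.sorted (PySem.Set.diff referenced defined) (fun x => x) false).map pvMsgUndef
  let fullSucc : PySem.Dict String (List String) :=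
    PySem.Dict.ofList (g.items.map (fun p => (p.1, pvFullSyms p.2)))
  let leftSucc : PySem.Dict String (List String) :=
    PySem.Dict.ofList (g.items.map (fun p => (p.1, pvLeftSyms p.2)))
  let warnings : List String :=
    match g.keys with   -- `if grammar:`
    | [] => warnings
    | start :: _ =>
      let reachable := pvClosureB fullSucc (start :: fullSucc.values.flatMap id)
        (PySem.Set.ofList [start]) [start]
        (PySem.Set.nodup_ofList _)
        (fun x hx => by
          rw [PySem.Set.mem_ofList] at hx
          exact List.mem_cons.2 (Or.inl (List.mem_singleton.1 hx)))
        (fun x y hy => pvSuccUniv fullSucc [start] x y hy)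
      warnings ++ (PySem.List.sorted (PySem.Set.diff defined reachable) (fun x => x) false).map
        (pvMsgUnreach start)
  g.items.foldl (fun ws p =>
    let starts := leftSucc.getD p.1 []
    let cyc := pvClosureB leftSucc (starts ++ leftSucc.values.flatMap id)
      (PySem.Set.ofList starts) starts
      (PySem.Set.nodup_ofList _)
      (fun x hx => List.mem_append_left _ ((PySem.Set.mem_ofList starts x).1 hx))
      (fun x y hy => pvSuccUniv leftSucc starts x y hy)
    if PySem.Set.contains cyc p.1 then
      let direct := p.2.filter (pvIsDirect p.1)
      if direct.isEmpty then ws ++ [pvMsgIndirect p.1]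
      else ws ++ direct.map (pvMsgDirect p.1)
    else ws) warnings

-- ===== PRECONDITION & SPEC =====
def Spec_semantic_analysis (grammar : List (String × List String)) (out : List String) : Prop := out = semantic_analysis_alt grammar
instance (grammar : List (String × List String)) (out : List String) : Decidable (Spec_semantic_analysis grammar out) := by unfold Spec_semantic_analysis; infer_instance

-- ===== CLAIM (what is proved, stated in full; the proofs are below) =====
def Claim_equal_semantic_analysis : Prop := ∀ (grammar : List (String × List String)), Dom_semantic_analysis grammar → Spec_semantic_analysis grammar (semantic_analysis grammar)

-- ===== LEMMAS AND PROOFS =====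

-- Step relations of the two symbol graphs (an edge per referenced / leftmost symbol).

/-- `y` is (a 1-char string of) an uppercase character of some production of `x`. -/
def pvFStep (g : PySem.Dict String (List String)) (x y : String) : Prop :=
  y ∈ pvFullSyms (g.getD x [])

/-- `y` is the uppercase leftmost symbol of some production of `x`. -/
def pvLStep (g : PySem.Dict String (List String)) (x y : String) : Prop :=
  y ∈ pvLeftSyms (g.getD x [])

lemma mem_pvFullSyms (prods : List String) (y : String) :
    y ∈ pvFullSyms prods ↔
      ∃ p ∈ prods, ∃ c ∈ p.toList, PySem.Chars.isupper c ∧ y = pvCh c := by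
  unfold pvFullSyms
  simp only [List.mem_flatMap, List.mem_map, List.mem_filter]
  constructor
  · rintro ⟨p, hp, c, ⟨hc, hu⟩, rfl⟩
    exact ⟨p, hp, c, hc, hu, rfl⟩
  · rintro ⟨p, hp, c, hc, hu, rfl⟩
    exact ⟨p, hp, c, ⟨hc, hu⟩, rfl⟩

lemma mem_pvLeftSyms (prods : List String) (y : String) :
    y ∈ pvLeftSyms prods ↔
      ∃ p ∈ prods, ∃ c, p.toList.head? = some c ∧ PySem.Chars.isupper c ∧ y = pvCh c := by
  unfold pvLeftSyms
  simp only [List.mem_filterMap]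
  constructor
  · rintro ⟨p, hp, hy⟩
    cases hl : p.toList with
    | nil => rw [hl] at hy; simp at hy
    | cons c t =>
      rw [hl] at hy
      dsimp only at hy
      split at hy
      · next hu =>
        cases hy
        exact ⟨p, hp, c, by rw [hl]; rfl, hu, rfl⟩
      · simp at hy
  · rintro ⟨p, hp, c, hc, hu, rfl⟩
    refine ⟨p, hp, ?_⟩
    cases hl : p.toList with
    | nil => rw [hl] at hc; simp at hc
    | cons c' t =>
      rw [hl] at hc
      simp only [List.head?_cons, Option.some.injEq] at hc
      subst hc
      simp [hu]

-- Bridge: a value-mapped copy of `g` (B's adjacency dicts) looks up to the mapped value.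
lemma pvMappedDict_getD (g : PySem.Dict String (List String)) (hnd : g.keys.Nodup)
    (f : List String → List String) (hf : f [] = []) (x : String) :
    (PySem.Dict.ofList (g.items.map (fun p => (p.1, f p.2)))).getD x [] = f (g.getD x []) := by
  have hitems : (PySem.Dict.ofList (g.items.map (fun p => (p.1, f p.2)))).items
      = g.items.map (fun p => (p.1, f p.2)) := by
    have h1 : ∀ a ∈ g.items.map (fun p => (p.1, f p.2)),
        (PySem.Dict.empty : PySem.Dict String (List String)).contains a.1 = false := by
      intro a _; rfl
    have h2 : ((g.items.map (fun p => (p.1, f p.2))).map Prod.fst).Nodup := by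
      have : (g.items.map (fun p => (p.1, f p.2))).map Prod.fst = g.keys := by
        rw [List.map_map]; rfl
      rw [this]; exact hnd
    have := PySem.Dict.items_foldl_insert_fresh (g.items.map (fun p => (p.1, f p.2)))
      Prod.fst Prod.snd PySem.Dict.empty h1 h2
    calc (PySem.Dict.ofList (g.items.map (fun p => (p.1, f p.2)))).items
        = ((g.items.map (fun p => (p.1, f p.2))).foldl
            (fun d a => d.insert a.1 a.2) PySem.Dict.empty).items := rfl
      _ = g.items.map (fun p => (p.1, f p.2)) := by
          rw [this]
          have : (fun a : String × List String => (a.1, a.2)) = id := by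
            funext a; rfl
          rw [this, List.map_id]
          rfl
  unfold PySem.Dict.getD PySem.Dict.get?
  rw [hitems, List.find?_map]
  have hpred : ((fun q => q.1 == x) ∘ fun p : String × List String => (p.1, f p.2))
      = fun p : String × List String => p.1 == x := rfl
  rw [hpred]
  cases hfind : g.items.find? (fun p => p.1 == x) with
  | none => simp [hf]
  | some q => simp

-- push-loop facts (monotone, complete)

lemma pvCharPushA_mono (r : PySem.Set String) (cs : List Char) (st : List String) :
    ∀ x ∈ st, x ∈ pvCharPushA r cs st := by
  induction cs generalizing st with
  | nil => intro x hx; exact hx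
  | cons c t ih =>
    intro x hx
    unfold pvCharPushA
    simp only [List.foldl_cons]
    refine ih _ x ?_
    split
    · exact List.mem_cons_of_mem _ hx
    · exact hx

lemma pvPushA_mono (r : PySem.Set String) (prods : List String) (st : List String) :
    ∀ x ∈ st, x ∈ pvPushA r prods st := by
  induction prods generalizing st with
  | nil => intro x hx; exact hx
  | cons p t ih =>
    intro x hx
    unfold pvPushA
    simp only [List.foldl_cons]
    exact ih _ x (pvCharPushA_mono r p.toList st x hx)

lemma pvCharPushA_complete (r : PySem.Set String) (cs : List Char) (st : List String)
    (c : Char) (hc : c ∈ cs) (hu : PySem.Chars.isupper c) :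
    pvCh c ∈ r ∨ pvCh c ∈ pvCharPushA r cs st := by
  induction cs generalizing st with
  | nil => simp at hc
  | cons a t ih =>
    unfold pvCharPushA
    simp only [List.foldl_cons]
    rcases List.mem_cons.1 hc with rfl | hc
    · by_cases hmem : pvCh c ∈ r
      · exact Or.inl hmem
      · refine Or.inr ?_
        have hcf : PySem.Set.contains r (pvCh c) = false := by
          rcases Bool.eq_false_or_eq_true (PySem.Set.contains r (pvCh c)) with h | h
          · exact absurd ((PySem.Set.contains_iff _ _).1 h) hmem
          · exact h
        have hcond : (PySem.Chars.isupper c && !(PySem.Set.contains r (pvCh c))) = true := by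
          rw [hcf, hu]; rfl
        rw [if_pos hcond]
        exact pvCharPushA_mono r t _ _ List.mem_cons_self
    · exact ih _ hc

lemma pvPushA_complete (r : PySem.Set String) (prods : List String) (st : List String)
    (p : String) (hp : p ∈ prods) (c : Char) (hc : c ∈ p.toList)
    (hu : PySem.Chars.isupper c) : pvCh c ∈ r ∨ pvCh c ∈ pvPushA r prods st := by
  induction prods generalizing st with
  | nil => simp at hp
  | cons a t ih =>
    unfold pvPushA
    simp only [List.foldl_cons]
    rcases List.mem_cons.1 hp with rfl | hp
    · rcases pvCharPushA_complete r p.toList st c hc hu with h | h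
      · exact Or.inl h
      · exact Or.inr (pvPushA_mono r t _ _ h)
    · exact ih _ hp

-- A's part-2 DFS computes exactly the `pvFStep`-reachable cone of the stack.

lemma pvDfsA_mono (g : PySem.Dict String (List String)) (univ : List String)
    (reach stack : List String)
    (hnd : reach.Nodup) (hr : ∀ x ∈ reach, x ∈ univ) (hs : ∀ x ∈ stack, x ∈ univ)
    (hpush : ∀ x p c, p ∈ g.getD x [] → c ∈ p.toList → pvCh c ∈ univ) :
    ∀ x, x ∈ reach ∨ x ∈ stack → x ∈ pvDfsA g univ reach stack hnd hr hs hpush := by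
  induction reach, stack, hnd, hr, hs using pvDfsA.induct (univ := univ) (hpush := hpush) with
  | case1 reach hnd hr hs _dup =>
    intro x hx
    unfold pvDfsA
    rcases hx with h | h
    · exact h
    · simp at h
  | case2 reach hnd hr current rest hs hc _dup ih =>
    intro x hx
    unfold pvDfsA
    rw [dif_pos hc]
    refine ih x ?_
    rcases hx with h | h
    · exact Or.inl h
    · rcases List.mem_cons.1 h with rfl | h
      · exact Or.inl ((PySem.Set.contains_iff reach x).1 hc)
      · exact Or.inr h
  | case3 reach hnd hr current rest hs hc _dup ih =>
    intro x hx
    unfold pvDfsA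
    rw [dif_neg hc]
    refine ih x ?_
    rcases hx with h | h
    · exact Or.inl ((PySem.Set.mem_add _ _ _).2 (Or.inl h))
    · rcases List.mem_cons.1 h with rfl | h
      · exact Or.inl ((PySem.Set.mem_add _ _ _).2 (Or.inr rfl))
      · exact Or.inr (pvPushA_mono _ _ _ x h)

lemma pvDfsA_sound (g : PySem.Dict String (List String)) (P : String → Prop)
    (hP : ∀ x y, P x → pvFStep g x y → P y) (univ : List String) (reach stack : List String)
    (hnd : reach.Nodup) (hr : ∀ x ∈ reach, x ∈ univ) (hs : ∀ x ∈ stack, x ∈ univ)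
    (hpush : ∀ x p c, p ∈ g.getD x [] → c ∈ p.toList → pvCh c ∈ univ) :
    (∀ x ∈ reach, P x) → (∀ s ∈ stack, P s) →
    ∀ z ∈ pvDfsA g univ reach stack hnd hr hs hpush, P z := by
  induction reach, stack, hnd, hr, hs using pvDfsA.induct (univ := univ) (hpush := hpush) with
  | case1 reach hnd hr hs _dup =>
    intro h1 _ z hz
    unfold pvDfsA at hz
    exact h1 z hz
  | case2 reach hnd hr current rest hs hc _dup ih =>
    intro h1 h2 z hz
    unfold pvDfsA at hz
    rw [dif_pos hc] at hz
    exact ih h1 (fun s hsm => h2 s (List.mem_cons_of_mem _ hsm)) z hz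
  | case3 reach hnd hr current rest hs hc _dup ih =>
    intro h1 h2 z hz
    unfold pvDfsA at hz
    rw [dif_neg hc] at hz
    have hcur : P current := h2 current List.mem_cons_self
    refine ih ?_ ?_ z hz
    · intro x hx
      rcases (PySem.Set.mem_add _ _ _).1 hx with h | rfl
      · exact h1 x h
      · exact hcur
    · intro s hsm
      rcases pvPushA_sound _ _ _ s hsm with h | ⟨p, hp, c, hcp, hu, rfl⟩
      · exact h2 s (List.mem_cons_of_mem _ h)
      · exact hP current _ hcur ((mem_pvFullSyms _ _).2 ⟨p, hp, c, hcp, hu, rfl⟩)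

lemma pvDfsA_closed (g : PySem.Dict String (List String)) (univ : List String)
    (reach stack : List String)
    (hnd : reach.Nodup) (hr : ∀ x ∈ reach, x ∈ univ) (hs : ∀ x ∈ stack, x ∈ univ)
    (hpush : ∀ x p c, p ∈ g.getD x [] → c ∈ p.toList → pvCh c ∈ univ) :
    (∀ x ∈ reach, ∀ y, pvFStep g x y → y ∈ reach ∨ y ∈ stack) →
    ∀ x ∈ pvDfsA g univ reach stack hnd hr hs hpush, ∀ y, pvFStep g x y →
      y ∈ pvDfsA g univ reach stack hnd hr hs hpush := by
  induction reach, stack, hnd, hr, hs using pvDfsA.induct (univ := univ) (hpush := hpush) with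
  | case1 reach hnd hr hs _dup =>
    intro hinv x hx y hy
    unfold pvDfsA at hx ⊢
    rcases hinv x hx y hy with h | h
    · exact h
    · simp at h
  | case2 reach hnd hr current rest hs hc _dup ih =>
    intro hinv x hx y hy
    unfold pvDfsA at hx ⊢
    rw [dif_pos hc] at hx ⊢
    refine ih ?_ x hx y hy
    intro a ha b hb
    rcases hinv a ha b hb with h | h
    · exact Or.inl h
    · rcases List.mem_cons.1 h with rfl | h
      · exact Or.inl ((PySem.Set.contains_iff reach b).1 hc)
      · exact Or.inr h
  | case3 reach hnd hr current rest hs hc _dup ih =>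
    intro hinv x hx y hy
    unfold pvDfsA at hx ⊢
    rw [dif_neg hc] at hx ⊢
    refine ih ?_ x hx y hy
    intro a ha b hb
    rcases (PySem.Set.mem_add _ _ _).1 ha with ha' | rfl
    · rcases hinv a ha' b hb with h | h
      · exact Or.inl ((PySem.Set.mem_add _ _ _).2 (Or.inl h))
      · rcases List.mem_cons.1 h with rfl | h
        · exact Or.inl ((PySem.Set.mem_add _ _ _).2 (Or.inr rfl))
        · exact Or.inr (pvPushA_mono _ _ _ b h)
    · rcases (mem_pvFullSyms _ _).1 hb with ⟨p, hp, c, hcp, hu, rfl⟩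
      rcases pvPushA_complete (PySem.Set.add reach a) (g.getD a []) rest p hp c hcp hu with h | h
      · exact Or.inl h
      · exact Or.inr h

lemma pvDfsA_mem (g : PySem.Dict String (List String)) (univ : List String) (start : String)
    (hnd : ([] : List String).Nodup) (hr : ∀ x ∈ ([] : List String), x ∈ univ)
    (hs : ∀ x ∈ [start], x ∈ univ)
    (hpush : ∀ x p c, p ∈ g.getD x [] → c ∈ p.toList → pvCh c ∈ univ) :
    ∀ z, z ∈ pvDfsA g univ [] [start] hnd hr hs hpush ↔
      Relation.ReflTransGen (pvFStep g) start z := by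
  intro z
  constructor
  · intro hz
    refine pvDfsA_sound g (fun w => Relation.ReflTransGen (pvFStep g) start w)
      (fun x y hx hxy => hx.tail hxy) univ [] [start] hnd hr hs hpush (by simp) ?_ z hz
    intro s hsm
    rw [List.mem_singleton] at hsm
    exact hsm ▸ Relation.ReflTransGen.refl
  · intro hz
    have hcl := pvDfsA_closed g univ [] [start] hnd hr hs hpush (by simp)
    induction hz with
    | refl => exact pvDfsA_mono g univ [] [start] hnd hr hs hpush start (Or.inr List.mem_cons_self)
    | tail hab hbc ih => exact hcl _ ih _ hbc

-- A's part-3 worklist computes the strictly-reachable cone of the leftmost graph.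

lemma pvLeftStepA_fst_mono (lhs : String) (st : PySem.Set String × List String) (prod : String) :
    ∀ x ∈ st.1, x ∈ (pvLeftStepA lhs st prod).1 := by
  intro x hx
  unfold pvLeftStepA
  cases prod.toList with
  | nil => exact hx
  | cons c t =>
    dsimp only
    split
    · exact (PySem.Set.mem_add _ _ _).2 (Or.inl hx)
    · exact hx

lemma pvLeftStepA_snd_mono (lhs : String) (st : PySem.Set String × List String) (prod : String) :
    ∀ x ∈ st.2, x ∈ (pvLeftStepA lhs st prod).2 := by
  intro x hx
  unfold pvLeftStepA
  cases prod.toList with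
  | nil => exact hx
  | cons c t =>
    dsimp only
    split
    · dsimp only
      split
      · exact hx
      · exact List.mem_cons_of_mem _ hx
    · exact hx

lemma pvLeftPushA_fst_mono (lhs : String) (prods : List String)
    (st : PySem.Set String × List String) : ∀ x ∈ st.1, x ∈ (pvLeftPushA lhs prods st).1 := by
  intro x hx
  exact pvFoldPres (fun st => x ∈ st.1) (pvLeftStepA lhs)
    (fun st a h => pvLeftStepA_fst_mono lhs st a x h) prods st hx

lemma pvLeftPushA_snd_mono (lhs : String) (prods : List String)
    (st : PySem.Set String × List String) : ∀ x ∈ st.2, x ∈ (pvLeftPushA lhs prods st).2 := by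
  intro x hx
  exact pvFoldPres (fun st => x ∈ st.2) (pvLeftStepA lhs)
    (fun st a h => pvLeftStepA_snd_mono lhs st a x h) prods st hx

lemma pvLeftStepA_snd_sound (lhs : String) (st : PySem.Set String × List String) (prod : String) :
    ∀ x ∈ (pvLeftStepA lhs st prod).2, x ∈ st.2 ∨ x ∈ (pvLeftStepA lhs st prod).1 := by
  unfold pvLeftStepA
  cases prod.toList with
  | nil => intro x hx; exact Or.inl hx
  | cons c t =>
    dsimp only
    intro x hx
    split at hx
    · dsimp only at hx
      split at hx
      · exact Or.inl hx
      · rcases List.mem_cons.1 hx with rfl | h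
        · next hcond _ =>
          rw [if_pos hcond]
          exact Or.inr ((PySem.Set.mem_add _ _ _).2 (Or.inr rfl))
        · exact Or.inl h
    · exact Or.inl hx

lemma pvLeftPushA_snd_sound (lhs : String) (prods : List String)
    (st : PySem.Set String × List String) :
    ∀ x ∈ (pvLeftPushA lhs prods st).2, x ∈ st.2 ∨ x ∈ (pvLeftPushA lhs prods st).1 := by
  induction prods generalizing st with
  | nil => intro x hx; exact Or.inl hx
  | cons p t ih =>
    intro x hx
    unfold pvLeftPushA at hx ⊢
    simp only [List.foldl_cons] at hx ⊢
    rcases ih _ x hx with h | h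
    · rcases pvLeftStepA_snd_sound lhs st p x h with h | h
      · exact Or.inl h
      · exact Or.inr (pvFoldPres (fun st => x ∈ st.1) (pvLeftStepA lhs)
          (fun st a hh => pvLeftStepA_fst_mono lhs st a x hh) t _ h)
    · exact Or.inr h

lemma pvLeftStepA_new_pushed (lhs : String) (st : PySem.Set String × List String) (prod : String) :
    ∀ x ∈ (pvLeftStepA lhs st prod).1,
      x ∈ st.1 ∨ x = lhs ∨ x ∈ (pvLeftStepA lhs st prod).2 := by
  unfold pvLeftStepA
  cases prod.toList with
  | nil => intro x hx; exact Or.inl hx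
  | cons c t =>
    dsimp only
    intro x hx
    split at hx
    · next hcond =>
      dsimp only at hx
      rcases (PySem.Set.mem_add _ _ _).1 hx with h | rfl
      · exact Or.inl h
      · rw [if_pos hcond]
        dsimp only
        by_cases heq : (pvCh c == lhs) = true
        · exact Or.inr (Or.inl (by simpa using heq))
        · rw [if_neg heq]
          exact Or.inr (Or.inr List.mem_cons_self)
    · exact Or.inl hx

lemma pvLeftPushA_new_pushed (lhs : String) (prods : List String)
    (st : PySem.Set String × List String) :
    ∀ x ∈ (pvLeftPushA lhs prods st).1,
      x ∈ st.1 ∨ x = lhs ∨ x ∈ (pvLeftPushA lhs prods st).2 := by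
  induction prods generalizing st with
  | nil => intro x hx; exact Or.inl hx
  | cons p t ih =>
    intro x hx
    unfold pvLeftPushA at hx ⊢
    simp only [List.foldl_cons] at hx ⊢
    rcases ih _ x hx with h | h
    · rcases pvLeftStepA_new_pushed lhs st p x h with h | h | h
      · exact Or.inl h
      · exact Or.inr (Or.inl h)
      · exact Or.inr (Or.inr (pvFoldPres (fun st => x ∈ st.2) (pvLeftStepA lhs)
          (fun st a hh => pvLeftStepA_snd_mono lhs st a x hh) t _ h))
    · exact Or.inr h

lemma pvLeftPushA_complete (lhs : String) (prods : List String)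
    (st : PySem.Set String × List String) :
    ∀ y ∈ pvLeftSyms prods, y ∈ (pvLeftPushA lhs prods st).1 := by
  induction prods generalizing st with
  | nil => intro y hy; simp [pvLeftSyms] at hy
  | cons p t ih =>
    intro y hy
    unfold pvLeftPushA
    simp only [List.foldl_cons]
    rcases (mem_pvLeftSyms (p :: t) y).1 hy with ⟨q, hq, c, hc, hu, rfl⟩
    rcases List.mem_cons.1 hq with rfl | hq
    · refine pvFoldPres (fun st => pvCh c ∈ st.1) (pvLeftStepA lhs)
        (fun st a hh => pvLeftStepA_fst_mono lhs st a _ hh) t _ ?_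
      unfold pvLeftStepA
      cases hl : q.toList with
      | nil => rw [hl] at hc; simp at hc
      | cons c' t' =>
        rw [hl] at hc
        simp only [List.head?_cons, Option.some.injEq] at hc
        subst hc
        dsimp only
        split
        · exact (PySem.Set.mem_add _ _ _).2 (Or.inr rfl)
        · next hcond =>
          rw [hu] at hcond
          simp only [Bool.true_and, Bool.not_eq_true', Bool.not_eq_false] at hcond
          exact (PySem.Set.contains_iff _ _).1 hcond
    · exact ih _ _ ((mem_pvLeftSyms t _).2 ⟨q, hq, c, hc, hu, rfl⟩)

lemma pvLeftDfsA_sound (g : PySem.Dict String (List String)) (lhs : String) (P : String → Prop)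
    (hP : ∀ x y, P x → pvLStep g x y → P y) (lr tv : List String)
    (hnd : lr.Nodup) (hlr : ∀ x ∈ lr, x ∈ pvDfsUniv g) :
    (∀ x ∈ lr, P x) → (∀ s ∈ tv, ∀ y, pvLStep g s y → P y) →
    ∀ z ∈ pvLeftDfsA g lhs lr tv hnd hlr, P z := by
  induction lr, tv, hnd, hlr using pvLeftDfsA.induct (g := g) (lhs := lhs) with
  | case1 lr hnd hlr =>
    intro h1 _ z hz
    unfold pvLeftDfsA at hz
    exact h1 z hz
  | case2 lr hnd hlr current rest ih =>
    intro h1 h2 z hz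
    unfold pvLeftDfsA at hz
    have h1' : ∀ x ∈ (pvLeftPushA lhs (g.getD current []) (lr, rest)).1, P x := by
      intro x hx
      rcases pvLeftPushA_fst_sound lhs _ _ x hx with h | ⟨p, hp, c, hc, hu, rfl⟩
      · exact h1 x h
      · exact h2 current List.mem_cons_self _ ((mem_pvLeftSyms _ _).2 ⟨p, hp, c, hc, hu, rfl⟩)
    refine ih h1' ?_ z hz
    intro s hsm y hy
    rcases pvLeftPushA_snd_sound lhs _ _ s hsm with h | h
    · exact h2 s (List.mem_cons_of_mem _ h) y hy
    · exact hP s y (h1' s h) hy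

lemma pvLeftDfsA_closed (g : PySem.Dict String (List String)) (lhs : String) (lr tv : List String)
    (hnd : lr.Nodup) (hlr : ∀ x ∈ lr, x ∈ pvDfsUniv g) :
    (∀ x, (x = lhs ∨ x ∈ lr) → x ∉ tv → ∀ y, pvLStep g x y → y ∈ lr) →
    ∀ x, (x = lhs ∨ x ∈ pvLeftDfsA g lhs lr tv hnd hlr) → ∀ y, pvLStep g x y →
      y ∈ pvLeftDfsA g lhs lr tv hnd hlr := by
  induction lr, tv, hnd, hlr using pvLeftDfsA.induct (g := g) (lhs := lhs) with
  | case1 lr hnd hlr =>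
    intro hinv x hx y hy
    unfold pvLeftDfsA at hx ⊢
    exact hinv x hx (by simp) y hy
  | case2 lr hnd hlr current rest ih =>
    intro hinv x hx y hy
    unfold pvLeftDfsA at hx ⊢
    refine ih ?_ x hx y hy
    intro a ha hatv b hb
    by_cases hac : a = current
    · subst hac
      exact pvLeftPushA_complete lhs _ _ b hb
    · have hanr : a ∉ rest := fun h => hatv (pvLeftPushA_snd_mono lhs _ _ a h)
      have hant : a ∉ current :: rest := by
        intro h
        rcases List.mem_cons.1 h with h | h
        · exact hac h
        · exact hanr h
      rcases ha with rfl | halr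
      · exact pvLeftPushA_fst_mono _ _ _ b (hinv a (Or.inl rfl) hant b hb)
      · rcases pvLeftPushA_new_pushed lhs _ _ a halr with h | rfl | h
        · exact pvLeftPushA_fst_mono _ _ _ b (hinv a (Or.inr h) hant b hb)
        · exact pvLeftPushA_fst_mono _ _ _ b (hinv a (Or.inl rfl) hant b hb)
        · exact absurd h hatv

lemma pvLeftDfsA_mem (g : PySem.Dict String (List String)) (lhs : String)
    (hnd : ([] : List String).Nodup) (hlr : ∀ x ∈ ([] : List String), x ∈ pvDfsUniv g) :
    lhs ∈ pvLeftDfsA g lhs [] [lhs] hnd hlr ↔ Relation.TransGen (pvLStep g) lhs lhs := by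
  constructor
  · intro hz
    refine pvLeftDfsA_sound g lhs (fun w => Relation.TransGen (pvLStep g) lhs w)
      (fun x y hx hxy => hx.tail hxy) [] [lhs] hnd hlr (by simp) ?_ lhs hz
    intro s hsm y hy
    rw [List.mem_singleton] at hsm
    subst hsm
    exact Relation.TransGen.single hy
  · intro htg
    have hcl := pvLeftDfsA_closed g lhs [] [lhs] hnd hlr (by
      intro x hx hxtv y hy
      rcases hx with rfl | h
      · exact absurd List.mem_cons_self hxtv
      · simp at h)
    have hres : ∀ z, Relation.TransGen (pvLStep g) lhs z →
        z ∈ pvLeftDfsA g lhs [] [lhs] hnd hlr := by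
      intro z hz
      induction hz with
      | single h => exact hcl lhs (Or.inl rfl) _ h
      | tail hab hbz ih => exact hcl _ (Or.inr ih) _ hbz
    exact hres lhs htg

-- B's `_closure` computes the reflexive-transitive cone of its start symbols.

lemma pvStepBFold_fst_mono (ys : List String) (st : PySem.Set String × List String) :
    ∀ x ∈ st.1, x ∈ (ys.foldl pvStepB st).1 := by
  intro x hx
  refine pvFoldPres (fun st => x ∈ st.1) pvStepB ?_ ys st hx
  intro st y h
  unfold pvStepB
  split
  · exact h
  · exact (PySem.Set.mem_add _ _ _).2 (Or.inl h)

lemma pvStepBFold_snd_mono (ys : List String) (st : PySem.Set String × List String) :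
    ∀ x ∈ st.2, x ∈ (ys.foldl pvStepB st).2 := by
  intro x hx
  refine pvFoldPres (fun st => x ∈ st.2) pvStepB ?_ ys st hx
  intro st y h
  unfold pvStepB
  split
  · exact h
  · exact List.mem_append_left _ h

lemma pvStepBFold_complete (ys : List String) (st : PySem.Set String × List String) :
    ∀ y ∈ ys, y ∈ (ys.foldl pvStepB st).1 := by
  induction ys generalizing st with
  | nil => intro y hy; simp at hy
  | cons a t ih =>
    intro y hy
    simp only [List.foldl_cons]
    rcases List.mem_cons.1 hy with rfl | hy
    · refine pvStepBFold_fst_mono t _ y ?_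
      unfold pvStepB
      split
      · next h => exact (PySem.Set.contains_iff _ _).1 h
      · exact (PySem.Set.mem_add _ _ _).2 (Or.inr rfl)
    · exact ih _ y hy

lemma pvStepBFold_new (ys : List String) (st : PySem.Set String × List String) :
    ∀ x ∈ (ys.foldl pvStepB st).1, x ∈ st.1 ∨ x ∈ (ys.foldl pvStepB st).2 := by
  induction ys generalizing st with
  | nil => intro x hx; exact Or.inl hx
  | cons a t ih =>
    intro x hx
    simp only [List.foldl_cons] at hx ⊢
    rcases ih _ x hx with h | h
    · unfold pvStepB at h
      split at h
      · exact Or.inl h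
      · rcases (PySem.Set.mem_add _ _ _).1 h with h | rfl
        · exact Or.inl h
        · refine Or.inr (pvStepBFold_snd_mono t _ x ?_)
          unfold pvStepB
          next hcond => rw [if_neg hcond]; exact List.mem_append_right _ List.mem_cons_self
    · exact Or.inr h

lemma pvStepBFold_snd_sound (ys : List String) (st : PySem.Set String × List String) :
    ∀ x ∈ (ys.foldl pvStepB st).2, x ∈ st.2 ∨ x ∈ (ys.foldl pvStepB st).1 := by
  induction ys generalizing st with
  | nil => intro x hx; exact Or.inl hx
  | cons a t ih =>
    intro x hx
    simp only [List.foldl_cons] at hx ⊢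
    rcases ih _ x hx with h | h
    · unfold pvStepB at h
      split at h
      · exact Or.inl h
      · rcases List.mem_append.1 h with h | h
        · exact Or.inl h
        · rw [List.mem_singleton] at h
          subst h
          refine Or.inr (pvStepBFold_fst_mono t _ x ?_)
          unfold pvStepB
          next hcond => rw [if_neg hcond]; exact (PySem.Set.mem_add _ _ _).2 (Or.inr rfl)
    · exact Or.inr h

lemma pvRoundB_fst_mono (succ : PySem.Dict String (List String)) (frontier : List String)
    (st : PySem.Set String × List String) : ∀ x ∈ st.1, x ∈ (pvRoundB succ frontier st).1 := by
  intro x hx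
  exact pvFoldPres (fun st => x ∈ st.1) _
    (fun st a h => pvStepBFold_fst_mono (succ.getD a []) st x h) frontier st hx

lemma pvRoundB_complete (succ : PySem.Dict String (List String)) (frontier : List String)
    (st : PySem.Set String × List String) (s : String) (hs : s ∈ frontier) :
    ∀ y ∈ succ.getD s [], y ∈ (pvRoundB succ frontier st).1 := by
  induction frontier generalizing st with
  | nil => simp at hs
  | cons a t ih =>
    intro y hy
    unfold pvRoundB
    simp only [List.foldl_cons]
    rcases List.mem_cons.1 hs with rfl | hs
    · exact pvFoldPres (fun st => y ∈ st.1) _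
        (fun st a h => pvStepBFold_fst_mono (succ.getD a []) st y h) t _
        (pvStepBFold_complete _ _ y hy)
    · exact ih _ hs y hy

lemma pvRoundB_new (succ : PySem.Dict String (List String)) (frontier : List String)
    (st : PySem.Set String × List String) :
    ∀ x ∈ (pvRoundB succ frontier st).1, x ∈ st.1 ∨ x ∈ (pvRoundB succ frontier st).2 := by
  induction frontier generalizing st with
  | nil => intro x hx; exact Or.inl hx
  | cons a t ih =>
    intro x hx
    unfold pvRoundB at hx ⊢
    simp only [List.foldl_cons] at hx ⊢
    rcases ih _ x hx with h | h
    · rcases pvStepBFold_new _ _ x h with h | h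
      · exact Or.inl h
      · exact Or.inr (pvFoldPres (fun st => x ∈ st.2) _
          (fun st a hh => pvStepBFold_snd_mono (succ.getD a []) st x hh) t _ h)
    · exact Or.inr h

lemma pvRoundB_snd_sound (succ : PySem.Dict String (List String)) (frontier : List String)
    (st : PySem.Set String × List String) :
    ∀ x ∈ (pvRoundB succ frontier st).2, x ∈ st.2 ∨ x ∈ (pvRoundB succ frontier st).1 := by
  induction frontier generalizing st with
  | nil => intro x hx; exact Or.inl hx
  | cons a t ih =>
    intro x hx
    unfold pvRoundB at hx ⊢
    simp only [List.foldl_cons] at hx ⊢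
    rcases ih _ x hx with h | h
    · rcases pvStepBFold_snd_sound _ _ x h with h | h
      · exact Or.inl h
      · exact Or.inr (pvFoldPres (fun st => x ∈ st.1) _
          (fun st a hh => pvStepBFold_fst_mono (succ.getD a []) st x hh) t _ h)
    · exact Or.inr h

lemma pvClosureB_mono (succ : PySem.Dict String (List String)) (univ : List String)
    (reach frontier : List String) (hnd : reach.Nodup) (hr : ∀ x ∈ reach, x ∈ univ)
    (hsucc : ∀ x y, y ∈ succ.getD x [] → y ∈ univ) :
    ∀ x ∈ reach, x ∈ pvClosureB succ univ reach frontier hnd hr hsucc := by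
  induction reach, frontier, hnd, hr using pvClosureB.induct (succ := succ) (univ := univ) (hsucc := hsucc) with
  | case1 reach hnd hr =>
    intro x hx
    unfold pvClosureB
    exact hx
  | case2 reach hnd hr current rest ih =>
    intro x hx
    unfold pvClosureB
    exact ih x (pvRoundB_fst_mono succ _ _ x hx)

lemma pvClosureB_sound (succ : PySem.Dict String (List String)) (P : String → Prop)
    (hP : ∀ x y, P x → y ∈ succ.getD x [] → P y) (univ : List String)
    (reach frontier : List String) (hnd : reach.Nodup) (hr : ∀ x ∈ reach, x ∈ univ)
    (hsucc : ∀ x y, y ∈ succ.getD x [] → y ∈ univ) :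
    (∀ x ∈ frontier, x ∈ reach) → (∀ x ∈ reach, P x) →
    ∀ z ∈ pvClosureB succ univ reach frontier hnd hr hsucc, P z := by
  induction reach, frontier, hnd, hr using pvClosureB.induct (succ := succ) (univ := univ) (hsucc := hsucc) with
  | case1 reach hnd hr =>
    intro _ h1 z hz
    unfold pvClosureB at hz
    exact h1 z hz
  | case2 reach hnd hr current rest ih =>
    intro hf h1 z hz
    unfold pvClosureB at hz
    have h1' : ∀ x ∈ (pvRoundB succ (current :: rest) (reach, [])).1, P x := by
      intro x hx
      rcases pvRoundB_fst_sound succ _ _ x hx with h | ⟨s, hsf, hy⟩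
      · exact h1 x h
      · exact hP s x (h1 s (hf s hsf)) hy
    refine ih ?_ h1' z hz
    intro x hx
    rcases pvRoundB_snd_sound succ _ _ x hx with h | h
    · simp at h
    · exact h

lemma pvClosureB_closed (succ : PySem.Dict String (List String)) (univ : List String)
    (reach frontier : List String) (hnd : reach.Nodup) (hr : ∀ x ∈ reach, x ∈ univ)
    (hsucc : ∀ x y, y ∈ succ.getD x [] → y ∈ univ) :
    (∀ x ∈ frontier, x ∈ reach) →
    (∀ x ∈ reach, x ∉ frontier → ∀ y, y ∈ succ.getD x [] → y ∈ reach) →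
    ∀ x ∈ pvClosureB succ univ reach frontier hnd hr hsucc, ∀ y, y ∈ succ.getD x [] →
      y ∈ pvClosureB succ univ reach frontier hnd hr hsucc := by
  induction reach, frontier, hnd, hr using pvClosureB.induct (succ := succ) (univ := univ) (hsucc := hsucc) with
  | case1 reach hnd hr =>
    intro _ hinv x hx y hy
    unfold pvClosureB at hx ⊢
    exact hinv x hx (by simp) y hy
  | case2 reach hnd hr current rest ih =>
    intro hf hinv x hx y hy
    unfold pvClosureB at hx ⊢
    refine ih ?_ ?_ x hx y hy
    · intro a ha
      rcases pvRoundB_snd_sound succ _ _ a ha with h | h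
      · simp at h
      · exact h
    · intro a ha hatv b hb
      rcases pvRoundB_new succ _ _ a ha with h | h
      · by_cases hafr : a ∈ current :: rest
        · exact pvRoundB_complete succ _ _ a hafr b hb
        · exact pvRoundB_fst_mono succ _ _ b (hinv a h hafr b hb)
      · exact absurd h hatv

lemma pvClosureB_mem (succ : PySem.Dict String (List String)) (univ : List String)
    (starts : List String) (hnd : (PySem.Set.ofList starts).Nodup)
    (hr : ∀ x ∈ PySem.Set.ofList starts, x ∈ univ)
    (hsucc : ∀ x y, y ∈ succ.getD x [] → y ∈ univ) :
    ∀ z, z ∈ pvClosureB succ univ (PySem.Set.ofList starts) starts hnd hr hsucc ↔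
      ∃ s ∈ starts, Relation.ReflTransGen (fun a b => b ∈ succ.getD a []) s z := by
  intro z
  constructor
  · intro hz
    refine pvClosureB_sound succ
      (fun w => ∃ s ∈ starts, Relation.ReflTransGen (fun a b => b ∈ succ.getD a []) s w)
      ?_ univ _ starts hnd hr hsucc ?_ ?_ z hz
    · rintro x y ⟨s, hs, hp⟩ hxy
      exact ⟨s, hs, hp.tail hxy⟩
    · intro x hx
      exact (PySem.Set.mem_ofList starts x).2 hx
    · intro x hx
      exact ⟨x, (PySem.Set.mem_ofList starts x).1 hx, Relation.ReflTransGen.refl⟩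
  · rintro ⟨s, hs, hp⟩
    have hcl := pvClosureB_closed succ univ _ starts hnd hr hsucc
      (fun x hx => (PySem.Set.mem_ofList starts x).2 hx)
      (fun x hx hxf => absurd ((PySem.Set.mem_ofList starts x).1 hx) hxf)
    induction hp with
    | refl =>
      exact pvClosureB_mono succ univ _ starts hnd hr hsucc s ((PySem.Set.mem_ofList starts s).2 hs)
    | tail hab hbc ih => exact hcl _ ih _ hbc

-- Assembly: A's character-scanning accumulation of `referenced` is B's flat set.

lemma pvCharAcc (cs : List Char) (acc : PySem.Set String) :
    cs.foldl (fun acc ch =>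
        if PySem.Chars.isupper ch then PySem.Set.add acc (pvCh ch) else acc) acc
      = ((cs.filter PySem.Chars.isupper).map pvCh).foldl PySem.Set.add acc := by
  induction cs generalizing acc with
  | nil => rfl
  | cons c t ih =>
    by_cases h : PySem.Chars.isupper c
    · simp only [List.foldl_cons, if_pos h, List.filter_cons_of_pos h, List.map_cons]
      exact ih _
    · simp only [List.foldl_cons, if_neg h, List.filter_cons_of_neg h]
      exact ih _

lemma pvProdAcc (prods : List String) (acc : PySem.Set String) :
    prods.foldl (fun acc prod =>
        prod.toList.foldl (fun acc ch =>
          if PySem.Chars.isupper ch then PySem.Set.add acc (pvCh ch) else acc) acc) acc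
      = (pvFullSyms prods).foldl PySem.Set.add acc := by
  induction prods generalizing acc with
  | nil => rfl
  | cons p t ih =>
    simp only [List.foldl_cons, pvFullSyms, List.flatMap_cons, List.foldl_append]
    rw [pvCharAcc]
    exact ih _

lemma pvValsAcc (vals : List (List String)) (acc : PySem.Set String) :
    vals.foldl (fun acc prods =>
        prods.foldl (fun acc prod =>
          prod.toList.foldl (fun acc ch =>
            if PySem.Chars.isupper ch then PySem.Set.add acc (pvCh ch) else acc) acc) acc) acc
      = (vals.flatMap pvFullSyms).foldl PySem.Set.add acc := by
  induction vals generalizing acc with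
  | nil => rfl
  | cons v t ih =>
    simp only [List.foldl_cons, List.flatMap_cons, List.foldl_append]
    rw [pvProdAcc]
    exact ih _

lemma pvReferenced_eq (vals : List (List String)) :
    vals.foldl (fun acc prods =>
        prods.foldl (fun acc prod =>
          prod.toList.foldl (fun acc ch =>
            if PySem.Chars.isupper ch then PySem.Set.add acc (pvCh ch) else acc) acc) acc)
      PySem.Set.empty = PySem.Set.ofList (vals.flatMap pvFullSyms) := by
  rw [PySem.Set.ofList_eq_foldl]
  exact pvValsAcc vals PySem.Set.empty

-- Membership-respecting congruences for `in` tests and set difference.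

lemma pvContains_congr (s t : PySem.Set String) (x : String) (h : x ∈ s ↔ x ∈ t) :
    PySem.Set.contains s x = PySem.Set.contains t x := by
  by_cases hx : x ∈ s
  · rw [(PySem.Set.contains_iff s x).2 hx, (PySem.Set.contains_iff t x).2 (h.1 hx)]
  · have hs : PySem.Set.contains s x = false := by
      rcases Bool.eq_false_or_eq_true (PySem.Set.contains s x) with hh | hh
      · exact absurd ((PySem.Set.contains_iff s x).1 hh) hx
      · exact hh
    have ht : PySem.Set.contains t x = false := by
      rcases Bool.eq_false_or_eq_true (PySem.Set.contains t x) with hh | hh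
      · exact absurd ((PySem.Set.contains_iff t x).1 hh) (fun hxt => hx (h.2 hxt))
      · exact hh
    rw [hs, ht]

lemma pvDiff_congr (s t t' : PySem.Set String) (h : ∀ x, x ∈ t ↔ x ∈ t') :
    PySem.Set.diff s t = PySem.Set.diff s t' := by
  unfold PySem.Set.diff
  apply List.filter_congr
  intro x _
  rw [pvContains_congr t t' x (h x)]

-- The relations walked by the two programs coincide.

lemma pvFullRel_eq (g : PySem.Dict String (List String)) (hnd : g.keys.Nodup) :
    (fun a b => b ∈ (PySem.Dict.ofList (g.items.map (fun p => (p.1, pvFullSyms p.2)))).getD a [])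
      = pvFStep g := by
  funext a b
  exact congrArg (b ∈ ·) (pvMappedDict_getD g hnd pvFullSyms rfl a)

lemma pvLeftRel_eq (g : PySem.Dict String (List String)) (hnd : g.keys.Nodup) :
    (fun a b => b ∈ (PySem.Dict.ofList (g.items.map (fun p => (p.1, pvLeftSyms p.2)))).getD a [])
      = pvLStep g := by
  funext a b
  exact congrArg (b ∈ ·) (pvMappedDict_getD g hnd pvLeftSyms rfl a)

-- The two reachability computations of part 2 agree (as membership).

lemma pvReach_iff (g : PySem.Dict String (List String)) (hnd : g.keys.Nodup) (start : String)
    (univA univ : List String)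
    (p1 : ([] : List String).Nodup) (p2 : ∀ x ∈ ([] : List String), x ∈ univA)
    (p3 : ∀ x ∈ [start], x ∈ univA)
    (p4 : ∀ x p c, p ∈ g.getD x [] → c ∈ p.toList → pvCh c ∈ univA)
    (q1 : (PySem.Set.ofList [start]).Nodup)
    (q2 : ∀ x ∈ PySem.Set.ofList [start], x ∈ univ)
    (q3 : ∀ x y, y ∈ (PySem.Dict.ofList (g.items.map (fun p => (p.1, pvFullSyms p.2)))).getD x [] →
      y ∈ univ) :
    ∀ z, z ∈ pvDfsA g univA [] [start] p1 p2 p3 p4 ↔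
      z ∈ pvClosureB (PySem.Dict.ofList (g.items.map (fun p => (p.1, pvFullSyms p.2)))) univ
        (PySem.Set.ofList [start]) [start] q1 q2 q3 := by
  intro z
  rw [pvDfsA_mem, pvClosureB_mem, pvFullRel_eq g hnd]
  constructor
  · intro h
    exact ⟨start, List.mem_cons_self, h⟩
  · rintro ⟨s, hs, h⟩
    rw [List.mem_singleton] at hs
    exact hs ▸ h

-- The two left-recursion tests of part 3 agree (as membership).

lemma pvCyc_iff (g : PySem.Dict String (List String)) (hnd : g.keys.Nodup) (lhs : String)
    (univ : List String)
    (p1 : ([] : List String).Nodup) (p2 : ∀ x ∈ ([] : List String), x ∈ pvDfsUniv g)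
    (q1 : (PySem.Set.ofList
      ((PySem.Dict.ofList (g.items.map (fun p => (p.1, pvLeftSyms p.2)))).getD lhs [])).Nodup)
    (q2 : ∀ x ∈ PySem.Set.ofList
      ((PySem.Dict.ofList (g.items.map (fun p => (p.1, pvLeftSyms p.2)))).getD lhs []), x ∈ univ)
    (q3 : ∀ x y, y ∈ (PySem.Dict.ofList (g.items.map (fun p => (p.1, pvLeftSyms p.2)))).getD x [] →
      y ∈ univ) :
    (lhs ∈ pvLeftDfsA g lhs [] [lhs] p1 p2 ↔
      lhs ∈ pvClosureB (PySem.Dict.ofList (g.items.map (fun p => (p.1, pvLeftSyms p.2)))) univ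
        (PySem.Set.ofList ((PySem.Dict.ofList (g.items.map (fun p => (p.1, pvLeftSyms p.2)))).getD lhs []))
        ((PySem.Dict.ofList (g.items.map (fun p => (p.1, pvLeftSyms p.2)))).getD lhs []) q1 q2 q3) := by
  rw [pvLeftDfsA_mem, pvClosureB_mem, pvLeftRel_eq g hnd]
  rw [Relation.TransGen.head'_iff]
  constructor
  · rintro ⟨b, hb, hp⟩
    refine ⟨b, ?_, hp⟩
    rw [pvMappedDict_getD g hnd pvLeftSyms rfl lhs]
    exact hb
  · rintro ⟨s, hs, hp⟩
    rw [pvMappedDict_getD g hnd pvLeftSyms rfl lhs] at hs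
    exact ⟨s, hs, hp⟩

-- Part 3: A's per-key scan equals B's per-item scan.

lemma pvPart3_eq (g : PySem.Dict String (List String)) (hnd : g.keys.Nodup) (ws0 : List String) :
    g.keys.foldl (fun ws lhs =>
      if PySem.Set.contains (pvLeftDfsA g lhs [] [lhs] List.nodup_nil (by simp)) lhs then
        if (g.getD lhs []).any (pvIsDirect lhs) then
          (g.getD lhs []).foldl (fun ws prod =>
            if pvIsDirect lhs prod then ws ++ [pvMsgDirect lhs prod] else ws) ws
        else ws ++ [pvMsgIndirect lhs]
      else ws) ws0
    = g.items.foldl (fun ws p =>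
        if PySem.Set.contains (pvClosureB
            (PySem.Dict.ofList (g.items.map (fun p => (p.1, pvLeftSyms p.2))))
            ((PySem.Dict.ofList (g.items.map (fun p => (p.1, pvLeftSyms p.2)))).getD p.1 [] ++
              (PySem.Dict.ofList (g.items.map (fun p => (p.1, pvLeftSyms p.2)))).values.flatMap id)
            (PySem.Set.ofList
              ((PySem.Dict.ofList (g.items.map (fun p => (p.1, pvLeftSyms p.2)))).getD p.1 []))
            ((PySem.Dict.ofList (g.items.map (fun p => (p.1, pvLeftSyms p.2)))).getD p.1 [])
            (PySem.Set.nodup_ofList _)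
            (fun x hx => List.mem_append_left _ ((PySem.Set.mem_ofList _ x).1 hx))
            (fun x y hy => pvSuccUniv _ _ x y hy)) p.1 then
          if ((p.2.filter (pvIsDirect p.1)).isEmpty : Bool) then ws ++ [pvMsgIndirect p.1]
          else ws ++ (p.2.filter (pvIsDirect p.1)).map (pvMsgDirect p.1)
        else ws) ws0 := by
  set L := PySem.Dict.ofList (g.items.map (fun p => (p.1, pvLeftSyms p.2))) with hL
  conv_rhs => rw [PySem.Dict.items_eq_map_keys g hnd ([] : List String)]
  rw [List.foldl_map]
  refine PySem.List.foldl_congr_mem _ _ _ _ ?_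
  intro acc lhs _
  dsimp only
  have hcyc : PySem.Set.contains (pvLeftDfsA g lhs [] [lhs] List.nodup_nil (by simp)) lhs
      = PySem.Set.contains (pvClosureB L (L.getD lhs [] ++ L.values.flatMap id)
          (PySem.Set.ofList (L.getD lhs [])) (L.getD lhs [])
          (PySem.Set.nodup_ofList _)
          (fun x hx => List.mem_append_left _ ((PySem.Set.mem_ofList (L.getD lhs []) x).1 hx))
          (fun x y hy => pvSuccUniv L (L.getD lhs []) x y hy)) lhs :=
    pvContains_congr _ _ lhs (pvCyc_iff g hnd lhs _ _ _ _ _ _)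
  rw [hcyc]
  split
  · by_cases hany : (g.getD lhs []).any (pvIsDirect lhs) = true
    · rw [if_pos hany, PySem.List.foldl_append_if]
      have hne : ((g.getD lhs []).filter (pvIsDirect lhs)).isEmpty = false := by
        rcases List.any_eq_true.1 hany with ⟨a, ha, hpa⟩
        exact List.isEmpty_eq_false_iff_exists_mem.2 ⟨a, List.mem_filter.2 ⟨ha, hpa⟩⟩
      rw [hne]
      simp
    · rw [if_neg hany]
      have he : ((g.getD lhs []).filter (pvIsDirect lhs)).isEmpty = true := by
        rw [List.isEmpty_iff, List.filter_eq_nil_iff]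
        intro a ha
        by_contra hpa
        exact hany (List.any_eq_true.2 ⟨a, ha, by simpa using hpa⟩)
      rw [he]
      simp
  · rfl

/-- `pvPart3_eq` with the key list abstracted (for use after case analysis on it). -/
lemma pvPart3_eq' (g : PySem.Dict String (List String)) (hnd : g.keys.Nodup)
    (ks : List String) (hks : g.keys = ks) (ws0 : List String) :
    ks.foldl (fun ws lhs =>
      if PySem.Set.contains (pvLeftDfsA g lhs [] [lhs] List.nodup_nil (by simp)) lhs then
        if (g.getD lhs []).any (pvIsDirect lhs) then
          (g.getD lhs []).foldl (fun ws prod =>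
            if pvIsDirect lhs prod then ws ++ [pvMsgDirect lhs prod] else ws) ws
        else ws ++ [pvMsgIndirect lhs]
      else ws) ws0
    = g.items.foldl (fun ws p =>
        if PySem.Set.contains (pvClosureB
            (PySem.Dict.ofList (g.items.map (fun p => (p.1, pvLeftSyms p.2))))
            ((PySem.Dict.ofList (g.items.map (fun p => (p.1, pvLeftSyms p.2)))).getD p.1 [] ++
              (PySem.Dict.ofList (g.items.map (fun p => (p.1, pvLeftSyms p.2)))).values.flatMap id)
            (PySem.Set.ofList
              ((PySem.Dict.ofList (g.items.map (fun p => (p.1, pvLeftSyms p.2)))).getD p.1 []))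
            ((PySem.Dict.ofList (g.items.map (fun p => (p.1, pvLeftSyms p.2)))).getD p.1 [])
            (PySem.Set.nodup_ofList _)
            (fun x hx => List.mem_append_left _ ((PySem.Set.mem_ofList _ x).1 hx))
            (fun x y hy => pvSuccUniv _ _ x y hy)) p.1 then
          if ((p.2.filter (pvIsDirect p.1)).isEmpty : Bool) then ws ++ [pvMsgIndirect p.1]
          else ws ++ (p.2.filter (pvIsDirect p.1)).map (pvMsgDirect p.1)
        else ws) ws0 := by
  subst hks
  exact pvPart3_eq g hnd ws0

theorem semantic_analysis_equal (grammar : List (String × List String)) :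
    semantic_analysis grammar = semantic_analysis_alt grammar := by
  have hnd : (PySem.Dict.ofList grammar).keys.Nodup := PySem.Dict.nodup_keys_ofList grammar
  unfold semantic_analysis semantic_analysis_alt
  dsimp only
  rw [pvReferenced_eq, PySem.List.foldl_append_singleton_eq_map, List.nil_append]
  cases hkeys : (PySem.Dict.ofList grammar).keys with
  | nil =>
    dsimp only
    exact pvPart3_eq' _ hnd _ hkeys _
  | cons start tl =>
    dsimp only
    rw [PySem.List.foldl_append_singleton_eq_map]
    rw [pvDiff_congr _ _ _ (pvReach_iff (PySem.Dict.ofList grammar) hnd start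
        (start :: (PySem.Dict.ofList grammar).values.flatMap
          (fun prods => prods.flatMap (fun p => p.toList.map pvCh)))
        (start :: (PySem.Dict.ofList ((PySem.Dict.ofList grammar).items.map
          (fun p => (p.1, pvFullSyms p.2)))).values.flatMap id)
        List.nodup_nil (by simp)
        (fun x hx => by
          rw [List.mem_singleton] at hx
          subst hx
          exact List.mem_cons_self)
        (fun x p c hp hc => List.mem_cons_of_mem _ (pvFlatUniv_of_prod _ x p c hp hc))
        (PySem.Set.nodup_ofList _)
        (by
          intro x hx
          rw [PySem.Set.mem_ofList] at hx
          exact List.mem_cons.2 (Or.inl (List.mem_singleton.1 hx)))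
        (fun x y hy => pvSuccUniv _ [start] x y hy))]
    exact pvPart3_eq' _ hnd _ hkeys _


-- ===== VERDICT (by name: the statement is the Claim_ definition above) =====
theorem semantic_analysis_spec : Claim_equal_semantic_analysis := by
  intro grammar _
  unfold Spec_semantic_analysis
  exact semantic_analysis_equal grammar
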